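-- pv_equiv track=rewrite | github.com/Priivacy-ai/spec-kitty | scripts/generate_schemas.py | _order_schema
-- ===== SOURCE A (Python) =====
-- from collections import OrderedDict
--
-- def _order_schema(schema: dict) -> OrderedDict:
--     """Order top-level keys to match the hand-written convention."""
--     key_order = [
--         "$schema",
--         "$id",
--         "title",
--         "description",
--         "type",
--         "additionalProperties",
--         "required",
--         "definitions",
--         "properties",
--         "allOf",
--     ]
--
--     ordered = OrderedDict()
--     for key in key_order:
--         if key in schema:
--             ordered[key] = schema[key]
--     # Any remaining keys
--     for key in schema:
--         if key not in ordered: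
--             ordered[key] = schema[key]
--     return ordered
-- ===== SOURCE B (Python) =====
-- from collections import OrderedDict
--
-- def _order_schema(schema: dict) -> OrderedDict:
--     """Order top-level keys to match the hand-written convention (stable sort by rank)."""
--     key_order = [
--         "$schema",
--         "$id",
--         "title",
--         "description",
--         "type",
--         "additionalProperties",
--         "required",
--         "definitions",
--         "properties",
--         "allOf",
--     ]
--     rank = {k: i for i, k in enumerate(key_order)}
--     sentinel = len(key_order)
--     return OrderedDict(
--         (k, schema[k]) for k in sorted(schema, key=lambda k: rank.get(k, sentinel))
--     )
-- ===== Notes on version B (the rewrite author's own statement) =====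
-- stated objective: idiomatic
-- what changed: A builds the result with two passes (one over the fixed key order with membership tests, one over the dict skipping keys already placed); B builds a rank map once and produces the result with a single stable sort of the keys by rank (len(key_order) as shared sentinel for unknown keys).
import Mathlib
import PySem

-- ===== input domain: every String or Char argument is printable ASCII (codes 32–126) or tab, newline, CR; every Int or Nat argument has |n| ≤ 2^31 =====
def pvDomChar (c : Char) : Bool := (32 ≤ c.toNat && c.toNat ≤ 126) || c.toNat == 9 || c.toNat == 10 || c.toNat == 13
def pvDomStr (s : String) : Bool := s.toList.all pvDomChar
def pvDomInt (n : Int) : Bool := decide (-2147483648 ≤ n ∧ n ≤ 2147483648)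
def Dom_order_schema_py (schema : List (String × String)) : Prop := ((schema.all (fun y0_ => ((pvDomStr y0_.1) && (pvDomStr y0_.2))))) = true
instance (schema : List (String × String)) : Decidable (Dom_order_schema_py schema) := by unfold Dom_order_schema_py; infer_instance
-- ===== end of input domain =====

-- B replaces A's two membership-testing passes by one stable sort of the keys under a
-- rank map (index in the fixed key order, len(key_order) as shared sentinel): idiomatic, not faster.

-- ===== PORT A =====
def pvKeyOrderA : List String :=
  ["$schema", "$id", "title", "description", "type", "additionalProperties",
   "required", "definitions", "properties", "allOf"]

-- 'schema[key]' is read with getD and an unused "" default: every lookup is guarded so the key is present.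
def order_schema_py (schema : List (String × String)) : List (String × String) :=
  let d : PySem.Dict String String := PySem.Dict.mk schema
  let ordered : PySem.Dict String String :=
    pvKeyOrderA.foldl
      (fun acc key => if d.contains key then acc.insert key (d.getD key "") else acc)
      PySem.Dict.empty
  -- 'for key in schema' iterates the dict's keys; kv.1 is that key
  let ordered2 : PySem.Dict String String :=
    schema.foldl
      (fun acc kv => if acc.contains kv.1 then acc else acc.insert kv.1 (d.getD kv.1 ""))
      ordered
  ordered2.items

-- ===== PORT B =====
def pvKeyOrderB : List String :=
  ["$schema", "$id", "title", "description", "type", "additionalProperties",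
   "required", "definitions", "properties", "allOf"]

-- rank = {k: i for i, k in enumerate(key_order)}
def pvRankB : PySem.Dict String Int :=
  (PySem.List.enumerate pvKeyOrderB 0).foldl (fun d p => d.insert p.2 p.1) PySem.Dict.empty

def order_schema_py_alt (schema : List (String × String)) : List (String × String) :=
  let d : PySem.Dict String String := PySem.Dict.mk schema
  let sentinel : Int := (pvKeyOrderB.length : Int)
  -- sorted(schema, key=lambda k: rank.get(k, sentinel)); schema[k] with k always present
  (PySem.List.sorted d.keys (fun k => pvRankB.getD k sentinel) false).map
    (fun k => (k, d.getD k ""))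

-- ===== PRECONDITION & SPEC =====
-- Pre_ excludes association lists with duplicate keys: they do not represent any Python dict
-- (A's parameter is a dict), so A's behaviour there is not defined by the Python at all.
def Pre_order_schema_py (schema : List (String × String)) : Prop :=
  (schema.map Prod.fst).Nodup
instance (schema : List (String × String)) : Decidable (Pre_order_schema_py schema) := by
  unfold Pre_order_schema_py; infer_instance

def pvWitness_order_schema_py : (List (String × String)) :=
  [("title", "T"), ("zeta", "z"), ("$id", "x")]

def Spec_order_schema_py (schema : List (String × String)) (out : List (String × String)) : Prop := out = order_schema_py_alt schema
instance (schema : List (String × String)) (out : List (String × String)) : Decidable (Spec_order_schema_py schema out) := by unfold Spec_order_schema_py; infer_instance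

-- ===== CLAIM (what is proved, stated in full; the proofs are below) =====
def Claim_equal_order_schema_py : Prop := ∀ (schema : List (String × String)), Dom_order_schema_py schema → Pre_order_schema_py schema → Spec_order_schema_py schema (order_schema_py schema)

-- ===== LEMMAS AND PROOFS =====

-- insertBy passes over a prefix it is not to be inserted before
lemma pv_insertBy_skip {α : Type} (p : α → α → Bool) (x : α) (l t : List α)
    (h : ∀ b ∈ l, p x b = false) :
    PySem.List.insertBy p x (l ++ t) = l ++ PySem.List.insertBy p x t := by
  induction l with
  | nil => simp
  | cons y ys ih =>
      have hy : p x y = false := h y (by simp)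
      simp [PySem.List.insertBy, hy, ih (fun b hb => h b (by simp [hb]))]

-- insertBy puts x in front when every element should come after it
lemma pv_insertBy_front {α : Type} (p : α → α → Bool) (x : α) (l : List α)
    (h : ∀ b ∈ l, p x b = true) :
    PySem.List.insertBy p x l = x :: l := by
  cases l with
  | nil => simp [PySem.List.insertBy]
  | cons y ys => simp [PySem.List.insertBy, h y (by simp)]

-- THE stable-sort characterisation: sorting distinct keys by "index in ko, else len ko"
-- yields the ko-keys in ko's order followed by the unknown keys in their original order.
lemma pv_stable_rank_sort (ko : List String) (key : String → Int) (hko : ko.Nodup)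
    (hrank : ∀ (j : Nat) (hj : j < ko.length), key ko[j] = (j : Int))
    (hsent : ∀ k, k ∉ ko → key k = (ko.length : Int)) :
    ∀ K : List String, K.Nodup →
      PySem.List.sorted K key false =
        ko.filter (fun k => decide (k ∈ K)) ++ K.filter (fun k => !decide (k ∈ ko)) := by
  have hkey_lt : ∀ b ∈ ko, key b < (ko.length : Int) := by
    intro b hb
    obtain ⟨j, hj, rfl⟩ := List.mem_iff_getElem.mp hb
    rw [hrank j hj]; exact_mod_cast hj
  intro K
  induction K using List.reverseRecOn with
  | nil => intro _; simp [PySem.List.sorted_eq_foldl_insertBy]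
  | append_singleton K x ih =>
      intro hnd
      have hK : K.Nodup := hnd.sublist (by simp)
      have hxK : x ∉ K := by
        intro hc
        have h3 := (List.nodup_append.mp hnd).2.2 x hc
        simp at h3
      rw [PySem.List.sorted_eq_foldl_insertBy, List.foldl_append, List.foldl_cons,
        List.foldl_nil, ← PySem.List.sorted_eq_foldl_insertBy, ih hK]
      by_cases hx : x ∈ ko
      · -- x is a known key: it is inserted at its rank position
        obtain ⟨l, r, rfl⟩ := List.append_of_mem hx
        have hxl : x ∉ l := by
          intro hc
          have h3 := (List.nodup_append.mp hko).2.2 x hc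
          simp at h3
        have hxr : x ∉ r :=
          (List.nodup_cons.mp (List.nodup_append.mp hko).2.1).1
        have h1x : l.length < (l ++ x :: r).length := by simp
        have hkx : key x = (l.length : Int) := by
          have h2 : (l ++ x :: r)[l.length]'h1x = x := by
            rw [List.getElem_append_right (le_refl l.length)]; simp
          have := hrank l.length h1x
          rwa [h2] at this
        have hlt : ∀ b ∈ l, key b < key x := by
          intro b hb
          obtain ⟨j, hj, rfl⟩ := List.mem_iff_getElem.mp hb
          have h1 : j < (l ++ x :: r).length := by simp; omega
          have h2 : (l ++ x :: r)[j]'h1 = l[j] := List.getElem_append_left hj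
          have h3 := hrank j h1
          rw [h2] at h3
          rw [h3, hkx]; exact_mod_cast hj
        have hgt : ∀ b ∈ r, key x < key b := by
          intro b hb
          obtain ⟨j, hj, rfl⟩ := List.mem_iff_getElem.mp hb
          have h1 : l.length + 1 + j < (l ++ x :: r).length := by simp; omega
          have h2 : (l ++ x :: r)[l.length + 1 + j]'h1 = r[j] := by
            rw [List.getElem_append_right (by omega)]
            have he : l.length + 1 + j - l.length = j + 1 := by omega
            simp [he]
          have h3 := hrank (l.length + 1 + j) h1
          rw [h2] at h3
          rw [h3, hkx]; push_cast; omega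
        have hfl : List.filter (fun k => decide (k ∈ K ++ [x])) l = List.filter (fun k => decide (k ∈ K)) l := by
          apply List.filter_congr
          intro b hb
          have hbx : b ≠ x := fun hc => hxl (hc ▸ hb)
          simp [hbx]
        have hfr : List.filter (fun k => decide (k ∈ K ++ [x])) r = List.filter (fun k => decide (k ∈ K)) r := by
          apply List.filter_congr
          intro b hb
          have hbx : b ≠ x := fun hc => hxr (hc ▸ hb)
          simp [hbx]
        have hQ : (K ++ [x]).filter (fun k => !decide (k ∈ l ++ x :: r)) = K.filter (fun k => !decide (k ∈ l ++ x :: r)) := by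
          rw [List.filter_append]
          simp
        rw [hQ]
        have e1 : List.filter (fun k => decide (k ∈ K)) (l ++ x :: r)
            = List.filter (fun k => decide (k ∈ K)) l ++ List.filter (fun k => decide (k ∈ K)) r := by
          simp [List.filter_append, hxK]
        have e2 : List.filter (fun k => decide (k ∈ K ++ [x])) (l ++ x :: r)
            = List.filter (fun k => decide (k ∈ K)) l ++ x :: List.filter (fun k => decide (k ∈ K)) r := by
          rw [List.filter_append, List.filter_cons, hfl, hfr]
          simp
        rw [e1, e2, List.append_assoc]
        have hskip : ∀ b ∈ List.filter (fun k => decide (k ∈ K)) l,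
            (fun a b => decide (key a < key b)) x b = false := by
          intro b hb
          have hb' : b ∈ l := List.mem_of_mem_filter hb
          simp [not_lt.mpr (le_of_lt (hlt b hb'))]
        have hfront : ∀ b ∈ List.filter (fun k => decide (k ∈ K)) r
              ++ List.filter (fun k => !decide (k ∈ l ++ x :: r)) K,
            (fun a b => decide (key a < key b)) x b = true := by
          intro b hb
          rcases List.mem_append.mp hb with hb1 | hb2
          · have hb' : b ∈ r := List.mem_of_mem_filter hb1
            simp [hgt b hb']
          · have hb' : ¬ (b ∈ l ++ x :: r) := by
              have := List.mem_filter.mp hb2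
              simpa using this.2
            have hs := hsent b hb'
            simp only [decide_eq_true_eq]
            rw [hkx, hs]
            simp
        rw [pv_insertBy_skip _ x _ _ hskip, pv_insertBy_front _ x _ hfront]
        simp
      · -- x is an unknown key: it is appended at the very end
        have hkx : key x = (ko.length : Int) := hsent x hx
        have hnb : ∀ b ∈ ko.filter (fun k => decide (k ∈ K)) ++ K.filter (fun k => !decide (k ∈ ko)),
            (fun a b => decide (key a < key b)) x b = false := by
          intro b hb
          rcases List.mem_append.mp hb with hb1 | hb2
          · have hb' : b ∈ ko := List.mem_of_mem_filter hb1
            have := hkey_lt b hb'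
            simp only [decide_eq_false_iff_not, not_lt]
            omega
          · have hb' : ¬ b ∈ ko := by
              have := List.mem_filter.mp hb2
              simpa using this.2
            have := hsent b hb'
            simp only [decide_eq_false_iff_not, not_lt]
            omega
        rw [PySem.List.insertBy_of_forall_not_before (fun a b => decide (key a < key b)) x
          (List.filter (fun k => decide (k ∈ K)) ko ++ List.filter (fun k => !decide (k ∈ ko)) K) hnb]
        have h1 : ko.filter (fun k => decide (k ∈ K ++ [x])) = ko.filter (fun k => decide (k ∈ K)) := by
          apply List.filter_congr
          intro b hb
          have hbx : b ≠ x := fun hc => hx (hc ▸ hb)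
          simp [hbx]
        have h2 : (K ++ [x]).filter (fun k => !decide (k ∈ ko)) = K.filter (fun k => !decide (k ∈ ko)) ++ [x] := by
          rw [List.filter_append]
          simp [hx]
        rw [h1, h2, ← List.append_assoc]

-- A's second loop appends exactly the pairs whose key is not yet in the accumulator
lemma pv_loop2_items (d : PySem.Dict String String) (l : List (String × String))
    (acc : PySem.Dict String String)
    (hnd : (l.map Prod.fst).Nodup) (hacc : acc.keys.Nodup) :
    (l.foldl (fun acc kv => if acc.contains kv.1 then acc else acc.insert kv.1 (d.getD kv.1 "")) acc).items
      = acc.items ++ (l.filter (fun kv => !acc.contains kv.1)).map (fun kv => (kv.1, d.getD kv.1 "")) := by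
  induction l generalizing acc with
  | nil => simp
  | cons kv t ih =>
      rw [List.map_cons, List.nodup_cons] at hnd
      have hnd' : (t.map Prod.fst).Nodup := hnd.2
      have hfst : ∀ p ∈ t, p.1 ≠ kv.1 := fun p hp hc =>
        hnd.1 (List.mem_map.mpr ⟨p, hp, hc⟩)
      by_cases hc : acc.contains kv.1 = true
      · rw [List.foldl_cons, if_pos hc, List.filter_cons]
        simpa [hc] using ih acc hnd' hacc
      · have hcf : acc.contains kv.1 = false := by simpa using hc
        rw [List.foldl_cons, if_neg hc, List.filter_cons]
        rw [ih _ hnd' (PySem.Dict.nodup_keys_insert acc kv.1 (d.getD kv.1 "") hacc)]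
        rw [PySem.Dict.items_insert_of_not_contains _ _ hcf]
        rw [List.filter_congr (fun p hp => by
          have h1 : (acc.insert kv.1 (d.getD kv.1 "")).contains p.1 = acc.contains p.1 := by
            rw [PySem.Dict.contains_insert]
            have hb : (p.1 == kv.1) = false := by simpa using hfst p hp
            simp [hb]
          rw [h1])]
        simp [hcf]

theorem order_schema_py_spec_aux (schema : List (String × String))
    (h : (schema.map Prod.fst).Nodup) :
    order_schema_py schema = order_schema_py_alt schema := by
  have hkonodup : pvKeyOrderA.Nodup := by decide
  have hrank : ∀ (j : Nat) (hj : j < pvKeyOrderA.length),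
      pvRankB.getD pvKeyOrderA[j] ((pvKeyOrderB.length : Int)) = (j : Int) := by decide
  have hrkeys : pvRankB.keys = pvKeyOrderA := by decide
  have hsent : ∀ k, k ∉ pvKeyOrderA → pvRankB.getD k ((pvKeyOrderB.length : Int)) = (pvKeyOrderA.length : Int) := by
    intro k hk
    rw [PySem.Dict.getD_of_not_contains]
    · rfl
    · rw [PySem.Dict.contains_eq_decide_mem_keys, hrkeys]
      simpa using hk
  have hitems : (PySem.Dict.mk schema).items = schema := rfl
  have hkeys : (PySem.Dict.mk schema).keys = schema.map Prod.fst := rfl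
  have hdnodup : (PySem.Dict.mk schema).keys.Nodup := by rw [hkeys]; exact h
  -- A's first loop, as a dict over the present known keys
  have hfilnd : (pvKeyOrderA.filter (fun k => (PySem.Dict.mk schema).contains k)).Nodup := hkonodup.filter _
  have hloop1 :
      (pvKeyOrderA.foldl
        (fun acc key => if (PySem.Dict.mk schema).contains key then acc.insert key ((PySem.Dict.mk schema).getD key "") else acc)
        PySem.Dict.empty)
      = (pvKeyOrderA.filter (fun k => (PySem.Dict.mk schema).contains k)).foldl
          (fun acc key => acc.insert key ((PySem.Dict.mk schema).getD key "")) PySem.Dict.empty :=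
    PySem.List.foldl_if_eq_foldl_filter _ _ _ _
  have hitems1 : ((pvKeyOrderA.filter (fun k => (PySem.Dict.mk schema).contains k)).foldl
          (fun acc key => acc.insert key ((PySem.Dict.mk schema).getD key "")) PySem.Dict.empty).items
      = (pvKeyOrderA.filter (fun k => (PySem.Dict.mk schema).contains k)).map
          (fun k => (k, (PySem.Dict.mk schema).getD k "")) := by
    have := PySem.Dict.items_foldl_insert_fresh
      (l := pvKeyOrderA.filter (fun k => (PySem.Dict.mk schema).contains k))
      (k := id) (v := fun k => (PySem.Dict.mk schema).getD k "") (d := PySem.Dict.empty)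
      (by intro a _; simp [PySem.Dict.contains_empty]) (by simpa using hfilnd)
    simpa using this
  have hkeys1 : ((pvKeyOrderA.filter (fun k => (PySem.Dict.mk schema).contains k)).foldl
          (fun acc key => acc.insert key ((PySem.Dict.mk schema).getD key "")) PySem.Dict.empty).keys
      = pvKeyOrderA.filter (fun k => (PySem.Dict.mk schema).contains k) := by
    show (_ : PySem.Dict String String).items.map Prod.fst = _
    rw [hitems1, List.map_map]
    exact List.map_id' _
  have hkeys1nd : ((pvKeyOrderA.filter (fun k => (PySem.Dict.mk schema).contains k)).foldl
          (fun acc key => acc.insert key ((PySem.Dict.mk schema).getD key "")) PySem.Dict.empty).keys.Nodup := by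
    rw [hkeys1]; exact hfilnd
  -- membership of a schema key in the first dict is membership in the fixed key order
  have hcont1 : ∀ kv ∈ schema,
      ((pvKeyOrderA.filter (fun k => (PySem.Dict.mk schema).contains k)).foldl
          (fun acc key => acc.insert key ((PySem.Dict.mk schema).getD key "")) PySem.Dict.empty).contains kv.1
        = decide (kv.1 ∈ pvKeyOrderA) := by
    intro kv hkv
    rw [PySem.Dict.contains_eq_decide_mem_keys, hkeys1]
    have hmemK : kv.1 ∈ schema.map Prod.fst := List.mem_map.mpr ⟨kv, hkv, rfl⟩
    by_cases hk : kv.1 ∈ pvKeyOrderA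
    · have hc : (PySem.Dict.mk schema).contains kv.1 = true := by
        rw [PySem.Dict.contains_eq_decide_mem_keys, hkeys]; simpa using hmemK
      simp [hk]
      exact ⟨kv.2, hkv⟩
    · simp [List.mem_filter, hk]
  -- assemble A
  have hA : order_schema_py schema
      = (pvKeyOrderA.filter (fun k => (PySem.Dict.mk schema).contains k)).map
          (fun k => (k, (PySem.Dict.mk schema).getD k ""))
        ++ (schema.filter (fun kv => !decide (kv.1 ∈ pvKeyOrderA))).map
          (fun kv => (kv.1, (PySem.Dict.mk schema).getD kv.1 "")) := by
    show (schema.foldl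
        (fun acc kv => if acc.contains kv.1 then acc else acc.insert kv.1 ((PySem.Dict.mk schema).getD kv.1 ""))
        (pvKeyOrderA.foldl
          (fun acc key => if (PySem.Dict.mk schema).contains key then acc.insert key ((PySem.Dict.mk schema).getD key "") else acc)
          PySem.Dict.empty)).items = _
    rw [hloop1]
    rw [pv_loop2_items (PySem.Dict.mk schema) schema _ h hkeys1nd, hitems1]
    congr 1
    congr 1
    apply List.filter_congr
    intro kv hkv
    rw [hcont1 kv hkv]
  -- assemble B
  have hsorted := pv_stable_rank_sort pvKeyOrderA
      (fun k => pvRankB.getD k ((pvKeyOrderB.length : Int))) hkonodup hrank hsent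
      (schema.map Prod.fst) h
  have hB : order_schema_py_alt schema
      = (pvKeyOrderA.filter (fun k => decide (k ∈ schema.map Prod.fst))).map
          (fun k => (k, (PySem.Dict.mk schema).getD k ""))
        ++ ((schema.map Prod.fst).filter (fun k => !decide (k ∈ pvKeyOrderA))).map
          (fun k => (k, (PySem.Dict.mk schema).getD k "")) := by
    show (PySem.List.sorted (PySem.Dict.mk schema).keys
        (fun k => pvRankB.getD k ((pvKeyOrderB.length : Int))) false).map
        (fun k => (k, (PySem.Dict.mk schema).getD k "")) = _
    rw [hkeys, hsorted, List.map_append]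
  rw [hA, hB]
  have hknown : pvKeyOrderA.filter (fun k => (PySem.Dict.mk schema).contains k)
      = pvKeyOrderA.filter (fun k => decide (k ∈ schema.map Prod.fst)) := by
    apply List.filter_congr
    intro k _
    rw [PySem.Dict.contains_eq_decide_mem_keys, hkeys]
  rw [hknown]
  congr 1
  rw [List.filter_map, List.map_map]
  apply List.map_congr_left
  intro kv _
  rfl

-- ===== VERDICT (by name: the statement is the Claim_ definition above) =====
theorem order_schema_py_spec : Claim_equal_order_schema_py := by
  intro schema _ hpre
  exact order_schema_py_spec_aux schema hpre
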